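-- pv_equiv track=rewrite | github.com/cwijay/doc_intelligence_ai_v2 | src/db/repositories/extraction_repository.py | _find_entity_id_field
-- ===== SOURCE A (Python) =====
-- from typing import Optional, List, Dict, Any
--
-- ENTITY_ID_FIELDS = [
--     "invoice_id", "invoice_number", "invoice_no",
--     "order_id", "order_number", "order_no",
--     "po_number", "po_id", "purchase_order_number",
--     "contract_id", "contract_number", "contract_no",
--     "receipt_id", "receipt_number", "receipt_no",
--     "quote_id", "quote_number",
--     "bill_id", "bill_number",
--     "reference_number", "reference_id", "ref_number",
-- ]
--
-- def _find_entity_id_field(schema: Dict[str, Any]) -> Optional[str]: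
--     """Find entity ID field in schema for duplicate detection.
--
--     Looks for common ID field names like invoice_id, invoice_number, etc.
--
--     Args:
--         schema: JSON schema with properties
--
--     Returns:
--         Field name if found, None otherwise
--     """
--     properties = schema.get("properties", {})
--     field_names = [name.lower() for name in properties.keys()]
--
--     for entity_field in ENTITY_ID_FIELDS:
--         if entity_field in field_names:
--             # Return the original case field name
--             for name in properties.keys():
--                 if name.lower() == entity_field:
--                     return name
--     return None
-- ===== SOURCE B (Python) =====
-- ENTITY_ID_FIELDS = [
--     "invoice_id", "invoice_number", "invoice_no",
--     "order_id", "order_number", "order_no",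
--     "po_number", "po_id", "purchase_order_number",
--     "contract_id", "contract_number", "contract_no",
--     "receipt_id", "receipt_number", "receipt_no",
--     "quote_id", "quote_number",
--     "bill_id", "bill_number",
--     "reference_number", "reference_id", "ref_number",
-- ]
--
-- def _find_entity_id_field(schema):
--     """One pass over the properties with a precomputed priority-rank table."""
--     rank = {f: i for i, f in enumerate(ENTITY_ID_FIELDS)}
--     properties = schema.get("properties", {})
--     best_name = None
--     best_rank = None
--     for name in properties.keys():
--         r = rank.get(name.lower())
--         if r is not None and (best_rank is None or r < best_rank):
--             best_name = name
--             best_rank = r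
--     return best_name
-- ===== Notes on version B (the rewrite author's own statement) =====
-- stated objective: alternative
-- what changed: Replaced A's outer loop over ENTITY_ID_FIELDS with nested membership/rescan passes over the property names by a precomputed field->priority rank table plus a single pass over the properties keeping the strictly-best-ranked name.
import Mathlib
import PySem

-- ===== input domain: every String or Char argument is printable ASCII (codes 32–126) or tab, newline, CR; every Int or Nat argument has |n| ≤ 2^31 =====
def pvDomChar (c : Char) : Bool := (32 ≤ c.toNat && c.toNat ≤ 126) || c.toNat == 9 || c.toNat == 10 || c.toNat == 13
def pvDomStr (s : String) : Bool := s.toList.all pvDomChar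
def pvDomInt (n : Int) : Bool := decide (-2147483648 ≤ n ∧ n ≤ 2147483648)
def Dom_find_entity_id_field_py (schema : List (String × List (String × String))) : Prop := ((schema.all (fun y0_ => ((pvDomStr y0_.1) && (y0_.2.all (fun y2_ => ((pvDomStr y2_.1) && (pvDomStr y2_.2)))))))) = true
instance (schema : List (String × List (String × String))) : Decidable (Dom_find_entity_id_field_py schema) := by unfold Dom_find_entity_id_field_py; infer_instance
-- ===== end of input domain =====

-- B replaces A's loop over the 22 candidate field names (each with a membership test and a
-- rescan of the property names) by a precomputed priority-rank table and ONE pass over the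
-- properties keeping the strictly-best-ranked name; equivalence is proved on all inputs.

-- B replaces A's loop over the 22 candidate field names (each with a membership test and a
-- rescan of the properties) by a precomputed priority-rank table and ONE pass over the
-- properties keeping the strictly-best-ranked name; equivalence is proved for all inputs.

-- ===== PORT A =====
def pvENTITY_ID_FIELDS : List String :=
  ["invoice_id", "invoice_number", "invoice_no",
   "order_id", "order_number", "order_no",
   "po_number", "po_id", "purchase_order_number",
   "contract_id", "contract_number", "contract_no",
   "receipt_id", "receipt_number", "receipt_no",
   "quote_id", "quote_number",
   "bill_id", "bill_number",
   "reference_number", "reference_id", "ref_number"]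

-- inner loop of A: "for name in properties.keys(): if name.lower() == entity_field: return name"
def pvFindName (e : String) : List (String × String) → Option String
  | [] => none
  | (n, _) :: rest => if PySem.Str.lower n = e then some n else pvFindName e rest

-- outer loop of A over ENTITY_ID_FIELDS ("if entity_field in field_names: ..."), continuing on no inner hit
def pvLoopA (props : List (String × String)) (fns : List String) : List String → Option String
  | [] => none
  | e :: rest =>
    if e ∈ fns then
      match pvFindName e props with
      | some n => some n
      | none => pvLoopA props fns rest
    else pvLoopA props fns rest

def find_entity_id_field_py (schema : List (String × List (String × String))) : Option String :=
  let properties := (PySem.Dict.mk schema).getD "properties" []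
  let field_names := properties.map (fun kv => PySem.Str.lower kv.1)
  pvLoopA properties field_names pvENTITY_ID_FIELDS

-- ===== PORT B =====
-- rank = {f: i for i, f in enumerate(ENTITY_ID_FIELDS)}
def pvRank : PySem.Dict String Int :=
  (PySem.List.enumerate pvENTITY_ID_FIELDS 0).foldl (fun d p => d.insert p.2 p.1) PySem.Dict.empty

-- loop body of B: r = rank.get(name.lower()); update (best_name, best_rank) on a strictly smaller rank
def pvStepB (b : Option String × Option Int) (kv : String × String) : Option String × Option Int :=
  match pvRank.get? (PySem.Str.lower kv.1) with
  | none => b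
  | some r =>
    match b.2 with
    | none => (some kv.1, some r)
    | some br => if r < br then (some kv.1, some r) else b

def find_entity_id_field_py_alt (schema : List (String × List (String × String))) : Option String :=
  let properties := (PySem.Dict.mk schema).getD "properties" []
  (properties.foldl pvStepB (none, none)).1

-- ===== PRECONDITION & SPEC =====
def Spec_find_entity_id_field_py (schema : List (String × List (String × String))) (out : Option String) : Prop := out = find_entity_id_field_py_alt schema
instance (schema : List (String × List (String × String))) (out : Option String) : Decidable (Spec_find_entity_id_field_py schema out) := by unfold Spec_find_entity_id_field_py; infer_instance

-- ===== CLAIM (what is proved, stated in full; the proofs are below) =====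
def Claim_equal_find_entity_id_field_py : Prop := ∀ (schema : List (String × List (String × String))), Dom_find_entity_id_field_py schema → Spec_find_entity_id_field_py schema (find_entity_id_field_py schema)

-- ===== LEMMAS AND PROOFS =====

-- rank of an (already lowered) name: its position in the candidate list, as a recursion
def pvRnk : List String → String → Option Int
  | [], _ => none
  | e :: rest, k => if k = e then some 0 else (pvRnk rest k).map (· + 1)

def pvFirstMin (ρ : String → Option Int) : List (String × String) → Option (String × Int)
  | [] => none
  | (n, _) :: rest =>
    match ρ (PySem.Str.lower n), pvFirstMin ρ rest with
    | none, x => x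
    | some r, none => some (n, r)
    | some r, some (q, m) => if r ≤ m then some (n, r) else some (q, m)

lemma pvRnk_nil (k : String) : pvRnk [] k = none := rfl
lemma pvRnk_cons (e : String) (rest : List String) (k : String) :
    pvRnk (e :: rest) k = if k = e then some 0 else (pvRnk rest k).map (· + 1) := rfl
lemma pvFirstMin_nil (ρ : String → Option Int) : pvFirstMin ρ [] = none := rfl
lemma pvFirstMin_cons (ρ : String → Option Int) (n v : String) (rest : List (String × String)) :
    pvFirstMin ρ ((n, v) :: rest) =
      match ρ (PySem.Str.lower n), pvFirstMin ρ rest with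
      | none, x => x
      | some r, none => some (n, r)
      | some r, some (q, m) => if r ≤ m then some (n, r) else some (q, m) := rfl

lemma pvRnk_nonneg {l : List String} {k : String} {r : Int} (h : pvRnk l k = some r) : 0 ≤ r := by
  induction l generalizing r with
  | nil => simp [pvRnk_nil] at h
  | cons e rest ih =>
    rw [pvRnk_cons] at h
    by_cases hk : k = e
    · simp [hk] at h; omega
    · simp [hk] at h
      obtain ⟨r', hr', rfl⟩ := h
      have := ih hr'; omega

lemma pvFirstMin_nonneg {ρ : String → Option Int} (hρ : ∀ k r, ρ k = some r → 0 ≤ r)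
    {props : List (String × String)} {q : String} {m : Int}
    (h : pvFirstMin ρ props = some (q, m)) : 0 ≤ m := by
  induction props generalizing q m with
  | nil => simp [pvFirstMin_nil] at h
  | cons p rest ih =>
    obtain ⟨n, v⟩ := p
    rw [pvFirstMin_cons] at h
    rcases hr : ρ (PySem.Str.lower n) with _ | r <;>
      rcases hf : pvFirstMin ρ rest with _ | ⟨q', m'⟩ <;> rw [hr, hf] at h
    · simp at h
    · simp at h; obtain ⟨h1, h2⟩ := h; exact ih (show pvFirstMin ρ rest = some (q, m) by rw [hf, h1, h2])
    · simp at h; obtain ⟨_, rfl⟩ := h; exact hρ _ _ hr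
    · by_cases hle : r ≤ m' <;> simp [hle] at h
      · obtain ⟨_, rfl⟩ := h; exact hρ _ _ hr
      · obtain ⟨h1, h2⟩ := h; exact ih (show pvFirstMin ρ rest = some (q, m) by rw [hf, h1, h2])

lemma pvFirstMin_nil_ents (props : List (String × String)) :
    pvFirstMin (pvRnk []) props = none := by
  induction props with
  | nil => rfl
  | cons p rest ih =>
    obtain ⟨n, v⟩ := p
    rw [pvFirstMin_cons, pvRnk_nil, ih]

lemma pvFindName_none_iff (e : String) (props : List (String × String)) :
    pvFindName e props = none ↔ e ∉ props.map (fun kv => PySem.Str.lower kv.1) := by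
  induction props with
  | nil => simp [pvFindName]
  | cons p rest ih =>
    obtain ⟨n, v⟩ := p
    by_cases h : PySem.Str.lower n = e
    · simp [pvFindName, h]
    · simp only [pvFindName, if_neg h, ih, List.map_cons, List.mem_cons]
      constructor
      · intro hx hor; rcases hor with h1 | h2
        · exact h h1.symm
        · exact hx h2
      · intro hx h2; exact hx (Or.inr h2)

lemma pvFirstMin_cons_ents (e : String) (rest : List String) (props : List (String × String)) :
    pvFirstMin (pvRnk (e :: rest)) props =
      match pvFindName e props with
      | some p => some (p, 0)
      | none => (pvFirstMin (pvRnk rest) props).map (fun q => (q.1, q.2 + 1)) := by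
  induction props with
  | nil => rfl
  | cons p tl ih =>
    obtain ⟨n, v⟩ := p
    rw [pvFirstMin_cons, pvRnk_cons, ih]
    by_cases hn : PySem.Str.lower n = e
    · rw [if_pos hn]
      rcases hft : pvFindName e tl with _ | p0
      · rcases hfm : pvFirstMin (pvRnk rest) tl with _ | ⟨q, m⟩
        · simp [pvFindName, hn]
        · have hm : 0 ≤ m := pvFirstMin_nonneg (fun k r h => pvRnk_nonneg h) hfm
          simp [pvFindName, hn, show (0:Int) ≤ m + 1 by omega]
      · simp [pvFindName, hn]
    · rw [if_neg hn]
      rcases hft : pvFindName e tl with _ | p0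
      · rcases hr : pvRnk rest (PySem.Str.lower n) with _ | r <;>
          rcases hfm : pvFirstMin (pvRnk rest) tl with _ | ⟨q, m⟩ <;>
            simp [pvFindName, hn, hft, pvFirstMin_cons, hr, hfm]
        by_cases hle : r ≤ m <;> simp [hle]
      · rcases hr : pvRnk rest (PySem.Str.lower n) with _ | r
        · simp [pvFindName, hn, hft]
        · have hrn : 0 ≤ r := pvRnk_nonneg hr
          simp [pvFindName, hn, hft, show ¬ (r + 1 ≤ 0) by omega]

lemma pvLoopA_eq_firstMin (ents : List String) (props : List (String × String)) :
    pvLoopA props (props.map (fun kv => PySem.Str.lower kv.1)) ents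
      = (pvFirstMin (pvRnk ents) props).map (·.1) := by
  induction ents with
  | nil => simp [pvLoopA, pvFirstMin_nil_ents]
  | cons e rest ih =>
    rcases hf : pvFindName e props with _ | p
    · have hmem := (pvFindName_none_iff e props).mp hf
      simp only [pvLoopA, hmem, if_false]
      rw [ih, pvFirstMin_cons_ents, hf]
      cases pvFirstMin (pvRnk rest) props <;> rfl
    · have hmem : e ∈ props.map (fun kv => PySem.Str.lower kv.1) := by
        by_contra h
        rw [← pvFindName_none_iff] at h
        simp [h] at hf
      simp [pvLoopA, hmem, hf, pvFirstMin_cons_ents]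

lemma pvRank_items : pvRank = PySem.Dict.mk
    ((PySem.List.enumerate pvENTITY_ID_FIELDS 0).map (fun p => (p.2, p.1))) := by decide

lemma get?_mk_enum (l : List String) (s : Int) (k : String) :
    (PySem.Dict.mk ((PySem.List.enumerate l s).map (fun p => (p.2, p.1)))).get? k
      = (pvRnk l k).map (· + s) := by
  induction l generalizing s with
  | nil => simp [PySem.List.enumerate_nil, pvRnk_nil, PySem.Dict.get?]
  | cons e rest ih =>
    rw [PySem.List.enumerate_cons]
    by_cases hk : k = e
    · simp [PySem.Dict.get?_mk_cons, pvRnk_cons, hk]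
    · have hbe : (e == k) = false := by simp [Ne.symm hk]
      rw [List.map_cons, PySem.Dict.get?_mk_cons, pvRnk_cons, if_neg hk]
      simp only [hbe, Bool.false_eq_true, if_false, ih (s + 1), Option.map_map]
      cases pvRnk rest k <;> (simp; try ring_nf)

lemma pvRank_get? (k : String) : pvRank.get? k = pvRnk pvENTITY_ID_FIELDS k := by
  rw [pvRank_items, get?_mk_enum]
  cases pvRnk pvENTITY_ID_FIELDS k <;> simp

-- the rank dictionary looks up exactly pvRnk
lemma pvFoldB_char (props : List (String × String)) :
    (∀ (n0 : String) (r0 : Int),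
      props.foldl pvStepB (some n0, some r0)
        = (match pvFirstMin pvRank.get? props with
           | none => (some n0, some r0)
           | some (q, m) => if m < r0 then (some q, some m) else (some n0, some r0))) ∧
    props.foldl pvStepB (none, none)
        = (match pvFirstMin pvRank.get? props with
           | none => ((none : Option String), (none : Option Int))
           | some (q, m) => (some q, some m)) := by
  induction props with
  | nil => exact ⟨fun _ _ => rfl, rfl⟩
  | cons p tl ih =>
    obtain ⟨n, v⟩ := p
    obtain ⟨ih1, ih2⟩ := ih
    constructor
    · intro n0 r0
      rw [List.foldl_cons, pvFirstMin_cons]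
      rcases hr : pvRank.get? (PySem.Str.lower n) with _ | r
      · rw [show pvStepB (some n0, some r0) (n, v) = (some n0, some r0) by simp [pvStepB, hr], ih1]
      · rw [show pvStepB (some n0, some r0) (n, v)
              = if r < r0 then (some n, some r) else (some n0, some r0) by simp [pvStepB, hr]]
        rcases hfm : pvFirstMin pvRank.get? tl with _ | ⟨q, m⟩
        · by_cases hlt : r < r0 <;> simp [hlt, ih1, hfm]
        · by_cases hlt : r < r0 <;> by_cases hle : r ≤ m <;>
            simp only [if_pos, hlt, hle, if_false, ih1, hfm] <;>
            split_ifs <;> first | rfl | omega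
    · rw [List.foldl_cons, pvFirstMin_cons]
      rcases hr : pvRank.get? (PySem.Str.lower n) with _ | r
      · rw [show pvStepB (none, none) (n, v) = (none, none) by simp [pvStepB, hr], ih2]
      · rw [show pvStepB (none, none) (n, v) = (some n, some r) by simp [pvStepB, hr]]
        rcases hfm : pvFirstMin pvRank.get? tl with _ | ⟨q, m⟩
        · simp [ih1, hfm]
        · by_cases hle : r ≤ m <;> simp [hle, ih1, hfm, show (m < r) ↔ ¬ (r ≤ m) from by omega]

-- ===== VERDICT (by name: the statement is the Claim_ definition above) =====
theorem find_entity_id_field_py_spec : Claim_equal_find_entity_id_field_py := by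
  intro schema _
  unfold Spec_find_entity_id_field_py
  show pvLoopA ((PySem.Dict.mk schema).getD "properties" [])
        (((PySem.Dict.mk schema).getD "properties" []).map (fun kv => PySem.Str.lower kv.1))
        pvENTITY_ID_FIELDS
      = (List.foldl pvStepB (none, none) ((PySem.Dict.mk schema).getD "properties" [])).1
  rw [(pvFoldB_char _).2, pvLoopA_eq_firstMin,
    show pvRank.get? = pvRnk pvENTITY_ID_FIELDS from funext pvRank_get?]
  rcases pvFirstMin (pvRnk pvENTITY_ID_FIELDS) ((PySem.Dict.mk schema).getD "properties" []) with _ | ⟨q, m⟩ <;> rfl
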